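-- pv_equiv track=rewrite | github.com/ashu2012/python | projects/algPack.py | lastOccurMostFreqElem
-- ===== SOURCE A (Python) =====
-- def lastOccurMostFreqElem(lst):
--     """
--     Returns the index of the last occurrence of the element that most frequently occurs in list lst
--     or -1 if lst is empty. If elements occur with equal frequency, returns index of the last of these.
--     Examples:
--     Input:generic list
--     Output: Integer
--     >>> lastOccurMostFreqElem([0,0,2,2,0,2])
--     5
--     >>> lastOccurMostFreqElem([3,2,2,3])
--     3
--     >>> lastOccurMostFreqElem([])
--     -1
--     >>> lastOccurMostFreqElem([0,1,2,3,4,5])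
--     5
--     >>> lastOccurMostFreqElem([3,[2],[2],[3],False])
--     2
--     """
--     if len(lst)==0:
--         return  -1
--
--     globalMostFrquent = lst[0]
--     globalMostfrequentindex=0
--     globalMostFrequestCount=1
--
--     for i in range(0,len(lst)):
--         currentMostFrquent = lst[i]
--         currentMostfrequentindex=i
--         currentMostFrequestCount=0
--         for j in range (0, len(lst)):
--             if(lst[j]== currentMostFrquent):
--                 currentMostfrequentindex=j
--                 currentMostFrequestCount= currentMostFrequestCount+1
--             else:
--                 continue
--         if(globalMostFrequestCount<=currentMostFrequestCount):
--             globalMostFrequestCount=currentMostFrequestCount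
--             globalMostfrequentindex=currentMostfrequentindex
--             globalMostFrquent=currentMostFrquent
--         else:
--             #do nothing
--             continue
--
--     return  globalMostfrequentindex
-- ===== SOURCE B (Python) =====
-- def lastOccurMostFreqElem(lst):
--     if len(lst) == 0:
--         return -1
--     counts = {}
--     for x in lst:
--         counts[x] = counts.get(x, 0) + 1
--     m = max(counts.values())
--     for i in range(len(lst) - 1, -1, -1):
--         if counts[lst[i]] == m:
--             return i
-- ===== Notes on version B (the rewrite author's own statement) =====
-- stated objective: faster
-- what changed: Replaced A's nested quadratic scan (recounting every element's frequency from scratch at each position) with one dict-counting pass, a max over the counts, and a single backward scan returning the first index whose element attains the maximal count.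
import Mathlib
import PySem

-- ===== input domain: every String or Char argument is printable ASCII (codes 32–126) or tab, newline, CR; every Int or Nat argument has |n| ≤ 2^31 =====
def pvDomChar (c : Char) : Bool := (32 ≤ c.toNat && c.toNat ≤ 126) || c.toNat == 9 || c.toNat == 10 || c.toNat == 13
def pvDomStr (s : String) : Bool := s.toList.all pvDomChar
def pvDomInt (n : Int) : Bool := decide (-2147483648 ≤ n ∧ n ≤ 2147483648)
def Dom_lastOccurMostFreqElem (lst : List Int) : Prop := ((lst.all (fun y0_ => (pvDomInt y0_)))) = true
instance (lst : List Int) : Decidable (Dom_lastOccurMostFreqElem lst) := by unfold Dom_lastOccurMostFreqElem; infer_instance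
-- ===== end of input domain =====

-- B replaces A's O(n^2) nested recount with one counting pass, a max, and one backward scan (O(n)).

-- ===== PORT A =====
-- literal transliteration of A: running (element, index, count) triple, recounting every
-- position's element over the whole list, keeping the candidate on '<='.
def lastOccurMostFreqElem (lst : List Int) : Int :=
  if lst.length = 0 then -1
  else
    let n : Int := lst.length
    let g0 : Int × Int × Int := (PySem.List.pyGetD lst 0 0, 0, 1)
    let gf := (PySem.List.pyRange 0 n 1).foldl (fun g i =>
      let cur := PySem.List.pyGetD lst i 0
      let inner := (PySem.List.pyRange 0 n 1).foldl (fun s j =>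
        if PySem.List.pyGetD lst j 0 == cur then (j, s.2 + 1) else s) (i, (0 : Int))
      if g.2.2 ≤ inner.2 then (cur, inner.1, inner.2) else g) g0
    gf.2.1

-- ===== PORT B =====
-- backward scan of Source B's final loop; the [] case is unreachable (the maximal count is
-- attained at some index), it only makes the function total.  counts[lst[i]] is ported as
-- getD _ 0: lst[i] is always a key of counts, so the default is never used (exact).
def altScan (counts : PySem.Dict Int Int) (m : Int) (lst : List Int) : List Int → Int
  | [] => -1
  | i :: rest =>
      if counts.getD (PySem.List.pyGetD lst i 0) 0 == m then i
      else altScan counts m lst rest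

def lastOccurMostFreqElem_alt (lst : List Int) : Int :=
  if lst.length = 0 then -1
  else
    let counts := lst.foldl (fun d x => d.insert x (d.getD x 0 + 1)) PySem.Dict.empty
    -- max(counts.values()): values is nonempty here, the .getD 0 default is never used
    let m := (PySem.List.max? counts.values (fun v => v)).getD 0
    altScan counts m lst (PySem.List.pyRange ((lst.length : Int) - 1) (-1) (-1))

-- ===== PRECONDITION & SPEC =====
def Spec_lastOccurMostFreqElem (lst : List Int) (out : Int) : Prop := out = lastOccurMostFreqElem_alt lst
instance (lst : List Int) (out : Int) : Decidable (Spec_lastOccurMostFreqElem lst out) := by unfold Spec_lastOccurMostFreqElem; infer_instance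

-- ===== CLAIM (what is proved, stated in full; the proofs are below) =====
def Claim_equal_lastOccurMostFreqElem : Prop := ∀ (lst : List Int), Dom_lastOccurMostFreqElem lst → Spec_lastOccurMostFreqElem lst (lastOccurMostFreqElem lst)

-- ===== LEMMAS AND PROOFS =====

-- the common characterisation: k is the last index whose element has maximal count
def pvGood (lst : List Int) (k : Nat) : Prop :=
  k < lst.length ∧
  (∀ i, i < lst.length → lst.count (lst.getD i 0) ≤ lst.count (lst.getD k 0)) ∧
  (∀ i, i < lst.length → lst.count (lst.getD i 0) = lst.count (lst.getD k 0) → i ≤ k)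

theorem pvGood_unique (lst : List Int) (k k' : Nat) (h : pvGood lst k) (h' : pvGood lst k') : k = k' := by
  obtain ⟨hk, hmax, hlast⟩ := h
  obtain ⟨hk', hmax', hlast'⟩ := h'
  have e1 := hmax k' hk'
  have e2 := hmax' k hk
  have hc : lst.count (lst.getD k 0) = lst.count (lst.getD k' 0) := le_antisymm e2 e1
  have := hlast k' hk' hc.symm
  have := hlast' k hk hc
  omega

theorem pv_map_range_getD (lst : List Int) :
    (List.range lst.length).map (fun j => lst.getD j 0) = lst := by
  apply List.ext_getElem
  · simp
  · intro i h1 h2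
    simp [List.getD_eq_getElem?_getD, h2]

theorem pv_countP_range (lst : List Int) (c : Int) :
    (List.range lst.length).countP (fun j => lst.getD j 0 == c) = lst.count c := by
  have := List.countP_map (p := fun x => x == c) (f := fun j => lst.getD j 0) (l := List.range lst.length)
  rw [pv_map_range_getD] at this
  rw [List.count]
  exact this.symm ▸ rfl

-- Nat-index forms of the two loops of port A
def innerF (lst : List Int) (c : Int) : (Int × Int) → Nat → (Int × Int) :=
  fun s j => if lst.getD j 0 == c then ((j : Int), s.2 + 1) else s

def outerF (lst : List Int) : (Int × Int × Int) → Nat → (Int × Int × Int) :=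
  fun g i =>
    let cur := lst.getD i 0
    let inner := (List.range lst.length).foldl (innerF lst cur) ((i : Int), 0)
    if g.2.2 ≤ inner.2 then (cur, inner.1, inner.2) else g

theorem pv_portA_eq (lst : List Int) (h : lst.length ≠ 0) :
    lastOccurMostFreqElem lst = ((List.range lst.length).foldl (outerF lst) (lst.getD 0 0, 0, 1)).2.1 := by
  unfold lastOccurMostFreqElem
  rw [if_neg h]
  simp only [PySem.List.pyRange_zero_nat, List.foldl_map, PySem.List.pyGetD_natCast,
    PySem.List.pyGetD_ofNat']
  rfl

theorem pv_inner_loop (lst : List Int) (c i0 cnt0 : Int) (k : Nat) :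
    (((List.range k).foldl (innerF lst c) (i0, cnt0)).2
        = cnt0 + ((List.range k).countP (fun j => lst.getD j 0 == c) : Int)) ∧
    ((((List.range k).foldl (innerF lst c) (i0, cnt0)).1 = i0 ∧ ∀ j, j < k → lst.getD j 0 ≠ c) ∨
      (∃ j, j < k ∧ lst.getD j 0 = c ∧ ((List.range k).foldl (innerF lst c) (i0, cnt0)).1 = (j : Int) ∧
        ∀ j', j' < k → lst.getD j' 0 = c → j' ≤ j)) := by
  induction k with
  | zero => simp
  | succ k ih =>
    rw [List.range_succ, List.foldl_append, List.foldl_cons, List.foldl_nil,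
        List.countP_append, List.countP_cons, List.countP_nil]
    obtain ⟨ih2, ih1⟩ := ih
    by_cases hc : lst.getD k 0 = c
    · have hT : ∀ s : Int × Int, innerF lst c s k = ((k : Int), s.2 + 1) := by
        intro s; simp only [innerF, hc, beq_self_eq_true, if_true]
      rw [hT]
      have hb : (lst.getD k 0 == c) = true := beq_iff_eq.mpr hc
      rw [hb]
      constructor
      · simp only []
        rw [ih2]
        push_cast
        ring
      · right
        exact ⟨k, by omega, hc, rfl, by intro j' hj' _; omega⟩
    · have hcb : (lst.getD k 0 == c) = false := beq_eq_false_iff_ne.mpr hc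
      have hF : ∀ s : Int × Int, innerF lst c s k = s := by
        intro s; simp only [innerF, hcb, Bool.false_eq_true, if_false]
      rw [hF, hcb]
      constructor
      · rw [ih2]; simp
      · rcases ih1 with ⟨h1, h2⟩ | ⟨j, hj, hjc, hjv, hjm⟩
        · left
          refine ⟨h1, ?_⟩
          intro j hjk
          by_cases hjk' : j < k
          · exact h2 j hjk'
          · have : j = k := by omega
            subst this; exact hc
        · right
          refine ⟨j, by omega, hjc, hjv, ?_⟩
          intro j' hj' hj'c
          by_cases hjk' : j' < k
          · exact hjm j' hjk' hj'c
          · have : j' = k := by omega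
            subst this; exact absurd hj'c hc

theorem pv_inner_full (lst : List Int) (i : Nat) (hi : i < lst.length) :
    ∃ li : Nat, (List.range lst.length).foldl (innerF lst (lst.getD i 0)) ((i : Int), 0)
        = ((li : Int), (lst.count (lst.getD i 0) : Int)) ∧
      li < lst.length ∧ lst.getD li 0 = lst.getD i 0 ∧
      ∀ j, j < lst.length → lst.getD j 0 = lst.getD i 0 → j ≤ li := by
  obtain ⟨h2, h1⟩ := pv_inner_loop lst (lst.getD i 0) (i : Int) 0 lst.length
  rw [pv_countP_range, zero_add] at h2
  rcases h1 with ⟨_, hno⟩ | ⟨j, hj, hjc, hjv, hjm⟩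
  · exact absurd rfl (hno i hi)
  · refine ⟨j, ?_, hj, hjc, hjm⟩
    rw [Prod.ext_iff]
    exact ⟨hjv, h2⟩

theorem pv_count_getD_pos (lst : List Int) (i : Nat) (hi : i < lst.length) :
    0 < lst.count (lst.getD i 0) := by
  rw [List.count_pos_iff, List.getD_eq_getElem lst 0 hi]
  exact List.getElem_mem hi

theorem pv_outer_loop (lst : List Int) (k : Nat) (h1 : 1 ≤ k) (h2 : k ≤ lst.length) :
    ∃ (e : Int) (li cc : Nat),
      (List.range k).foldl (outerF lst) (lst.getD 0 0, 0, 1) = (e, (li : Int), (cc : Int)) ∧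
      lst.getD li 0 = e ∧ li < lst.length ∧ lst.count e = cc ∧
      (∀ i, i < k → lst.count (lst.getD i 0) ≤ cc) ∧
      (∀ j, j < lst.length → lst.getD j 0 = e → j ≤ li) ∧
      (∀ i, i < k → lst.count (lst.getD i 0) = cc → i ≤ li) := by
  induction k with
  | zero => omega
  | succ k ih =>
    by_cases hk0 : k = 0
    · -- base case: the first iteration always replaces the initial state
      subst hk0
      have h0 : 0 < lst.length := by omega
      obtain ⟨li, heq, hli, hlie, hlast⟩ := pv_inner_full lst 0 h0
      have hcnt := pv_count_getD_pos lst 0 h0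
      refine ⟨lst.getD 0 0, li, lst.count (lst.getD 0 0), ?_, hlie, hli, rfl, ?_, hlast, ?_⟩
      · show (List.range 1).foldl (outerF lst) (lst.getD 0 0, 0, 1) = _
        rw [List.range_one, List.foldl_cons, List.foldl_nil]
        rw [Nat.cast_zero] at heq
        simp only [outerF, Nat.cast_zero]
        rw [heq]
        rw [if_pos (show (1:Int) ≤ ((li:Int), (List.count (lst.getD 0 0) lst : Int)).2 by
          change (1:Int) ≤ (List.count (lst.getD 0 0) lst : Int); exact_mod_cast hcnt)]
      · intro i hi
        have : i = 0 := by omega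
        subst this; exact le_refl _
      · intro i hi _
        omega
    · have hk1 : 1 ≤ k := by omega
      obtain ⟨e, li, cc, heq, hlie, hli, hcc, hmax, hlaste, hlast⟩ := ih hk1 (by omega)
      have hkn : k < lst.length := by omega
      obtain ⟨li2, heq2, hli2, hli2e, hlast2⟩ := pv_inner_full lst k hkn
      rw [List.range_succ, List.foldl_append, List.foldl_cons, List.foldl_nil, heq]
      by_cases hle : ((cc : Int) ≤ (lst.count (lst.getD k 0) : Int))
      · refine ⟨lst.getD k 0, li2, lst.count (lst.getD k 0), ?_, hli2e, hli2, rfl, ?_, hlast2, ?_⟩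
        · simp only [outerF, heq2]
          rw [if_pos hle]
        · intro i hi
          by_cases hik : i < k
          · exact le_trans (hmax i hik) (by exact_mod_cast hle)
          · have : i = k := by omega
            subst this; exact le_refl _
        · intro i hi hieq
          have hkli2 : k ≤ li2 := hlast2 k hkn rfl
          by_cases hik : i < k
          · omega
          · have : i = k := by omega
            omega
      · refine ⟨e, li, cc, ?_, hlie, hli, hcc, ?_, hlaste, ?_⟩
        · simp only [outerF, heq2]
          rw [if_neg hle]
        · intro i hi
          by_cases hik : i < k
          · exact hmax i hik
          · have hie : i = k := by omega
            rw [hie]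
            have : (lst.count (lst.getD k 0) : Int) < (cc : Int) := by omega
            exact_mod_cast le_of_lt this
        · intro i hi hieq
          by_cases hik : i < k
          · exact hlast i hik hieq
          · have hie : i = k := by omega
            rw [hie] at hieq
            rw [hieq] at hle
            omega

theorem pv_A_good (lst : List Int) (h : lst ≠ []) :
    ∃ k : Nat, pvGood lst k ∧ lastOccurMostFreqElem lst = (k : Int) := by
  have hn : lst.length ≠ 0 := by simpa using h
  obtain ⟨e, li, cc, heq, hlie, hli, hcc, hmax, hlaste, hlast⟩ :=
    pv_outer_loop lst lst.length (by omega) (le_refl _)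
  refine ⟨li, ⟨hli, ?_, ?_⟩, ?_⟩
  · intro i hi
    rw [hlie, hcc]
    exact hmax i hi
  · intro i hi hieq
    rw [hlie, hcc] at hieq
    exact hlast i hi hieq
  · rw [pv_portA_eq lst hn, heq]

theorem pv_scan (lst : List Int) (m : Int) : ∀ k : Nat,
    (∃ i, i < k ∧ (PySem.Dict.counter lst).getD (lst.getD i 0) 0 = m) →
    ∃ g, g < k ∧ (PySem.Dict.counter lst).getD (lst.getD g 0) 0 = m ∧
      (∀ i, i < k → (PySem.Dict.counter lst).getD (lst.getD i 0) 0 = m → i ≤ g) ∧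
      altScan (PySem.Dict.counter lst) m lst (PySem.List.pyRange ((k : Int) - 1) (-1) (-1)) = (g : Int) := by
  intro k
  induction k with
  | zero => rintro ⟨i, hi, _⟩; omega
  | succ k ih =>
    intro hex
    have hcast : ((k + 1 : Nat) : Int) - 1 = (k : Int) := by push_cast; ring
    rw [hcast, PySem.List.pyRange_neg_one_cons (show (-1:Int) < (k:Int) by omega)]
    rw [altScan]
    rw [PySem.List.pyGetD_natCast]
    by_cases hq : (PySem.Dict.counter lst).getD (lst.getD k 0) 0 = m
    · rw [if_pos (beq_iff_eq.mpr hq)]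
      exact ⟨k, by omega, hq, by intro i hi _; omega, rfl⟩
    · rw [if_neg (by simpa using hq)]
      have hex' : ∃ i, i < k ∧ (PySem.Dict.counter lst).getD (lst.getD i 0) 0 = m := by
        obtain ⟨i, hi, hqi⟩ := hex
        refine ⟨i, ?_, hqi⟩
        by_cases hik : i = k
        · rw [hik] at hqi; exact absurd hqi hq
        · omega
      obtain ⟨g, hg, hqg, hmax, hval⟩ := ih hex'
      exact ⟨g, by omega, hqg, by
        intro i hi hqi
        by_cases hik : i = k
        · rw [hik] at hqi; exact absurd hqi hq
        · exact hmax i (by omega) hqi, hval⟩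

theorem pv_B_good (lst : List Int) (h : lst ≠ []) :
    ∃ k : Nat, pvGood lst k ∧ lastOccurMostFreqElem_alt lst = (k : Int) := by
  have hn : lst.length ≠ 0 := by simpa using h
  have hvals : (PySem.Dict.counter lst).values
      = (PySem.Set.ofList lst).map (fun x => ((lst.count x : Nat) : Int)) := by
    show ((PySem.Dict.counter lst).items.map (·.2)) = _
    rw [PySem.Dict.items_counter, List.map_map]
    rfl
  -- max? of the values is some m
  have hvne : (PySem.Dict.counter lst).values ≠ [] := by
    rw [hvals]
    simp only [ne_eq, List.map_eq_nil_iff]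
    intro hsetnil
    rcases lst with _ | ⟨a, t⟩
    · exact h rfl
    · have : a ∈ PySem.Set.ofList (a :: t) := (PySem.Set.mem_ofList _ _).mpr (List.mem_cons_self)
      rw [hsetnil] at this
      exact absurd this (List.not_mem_nil)
  obtain ⟨m, hmx⟩ : ∃ m, PySem.List.max? (PySem.Dict.counter lst).values (fun v => v) = some m := by
    cases hmx : PySem.List.max? (PySem.Dict.counter lst).values (fun v => v) with
    | none => exact absurd ((PySem.List.max?_eq_none_iff _ _).mp hmx) hvne
    | some m => exact ⟨m, rfl⟩
  -- m is the count of some element of lst, and bounds every element's count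
  have hmmem := PySem.List.max?_mem hmx
  rw [hvals] at hmmem
  obtain ⟨x, hxset, hxm⟩ := List.mem_map.mp hmmem
  have hxlst : x ∈ lst := (PySem.Set.mem_ofList _ _).mp hxset
  obtain ⟨p, hp, hpx⟩ := List.mem_iff_getElem.mp hxlst
  have hpgetD : lst.getD p 0 = x := by rw [List.getD_eq_getElem lst 0 hp, hpx]
  have hub : ∀ i, i < lst.length → ((lst.count (lst.getD i 0) : Nat) : Int) ≤ m := by
    intro i hi
    have hmem : ((lst.count (lst.getD i 0) : Nat) : Int) ∈ (PySem.Dict.counter lst).values := by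
      rw [hvals]
      exact List.mem_map.mpr ⟨lst.getD i 0,
        (PySem.Set.mem_ofList _ _).mpr (by rw [List.getD_eq_getElem lst 0 hi]; exact List.getElem_mem hi), rfl⟩
    exact PySem.List.max?_isMax hmx _ hmem
  -- the backward scan finds the last index attaining m
  obtain ⟨g, hg, hqg, hmax, hval⟩ := pv_scan lst m lst.length
    ⟨p, hp, by rw [PySem.Dict.getD_counter, hpgetD, hxm]⟩
  rw [PySem.Dict.getD_counter] at hqg
  refine ⟨g, ⟨hg, ?_, ?_⟩, ?_⟩
  · intro i hi
    have := hub i hi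
    rw [← hqg] at this
    exact_mod_cast this
  · intro i hi hieq
    refine hmax i hi ?_
    rw [PySem.Dict.getD_counter, hieq, hqg]
  · unfold lastOccurMostFreqElem_alt
    rw [if_neg hn]
    simp only [PySem.Dict.foldl_insert_getD_add_one_eq_counter, hmx, Option.getD_some]
    exact hval


-- ===== VERDICT (by name: the statement is the Claim_ definition above) =====
theorem lastOccurMostFreqElem_spec : Claim_equal_lastOccurMostFreqElem := by
  intro lst _
  unfold Spec_lastOccurMostFreqElem
  by_cases h : lst = []
  · subst h; rfl
  · obtain ⟨k, hg, hA⟩ := pv_A_good lst h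
    obtain ⟨k', hg', hB⟩ := pv_B_good lst h
    have := pvGood_unique lst k k' hg hg'
    rw [hA, hB, this]
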